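-- pv_equiv track=rewrite | github.com/nickmachnik/AoC-solutions | 2020/python/day16/solution.py | find_possible_field_names
-- ===== SOURCE A (Python) =====
-- def make_global_ranges(field_rules):
--     single_ranges = set()
--     for ranges in field_rules.values():
--         for r in ranges:
--             single_ranges.add(r)
--     merged_ranges = []
--     while len(single_ranges) > 0:
--         start_a, end_a = single_ranges.pop()
--         to_remove = []
--         for r in single_ranges:
--             start_b, end_b = r
--             if not (start_a > end_b + 1 or start_b > end_a + 1):
--                 start_a = min(start_a, start_b)
--                 end_a = max(end_a, end_b)
--                 to_remove.append(r)
--         for r in to_remove: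
--             single_ranges.remove(r)
--         merged_ranges.append((start_a, end_a))
--     return merged_ranges
--
-- def find_valid_tickets(field_rules, tickets):
--     merged_ranges = make_global_ranges(field_rules)
--     valid_tickets = []
--     for ticket in tickets:
--         if is_valid_ticket(merged_ranges, ticket):
--             valid_tickets.append(ticket)
--     return valid_tickets
--
-- def is_valid_ticket(merged_ranges, ticket):
--     return all(is_valid_value(merged_ranges, value) for value in ticket)
--
-- def is_valid_value(merged_ranges, value):
--     for lo, hi in merged_ranges:
--         if value <= hi and value >= lo:
--             return True
--     return False
--
-- def find_possible_field_names(field_rules, tickets):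
--     valid_tickets = find_valid_tickets(field_rules, tickets)
--     possible_field_names = []
--     for i in range(len(tickets[0])):
--         possible_field_names.append(set(field_rules.keys()).copy())
--     for ticket in valid_tickets:
--         for field_index, value in enumerate(ticket):
--             to_remove = []
--             for remaining_option in possible_field_names[field_index]:
--                 if all(
--                     (value > hi or value < lo)
--                         for lo, hi in field_rules[remaining_option]):
--                     to_remove.append(remaining_option)
--             for field_name in to_remove:
--                 possible_field_names[field_index].remove(field_name)
--     return possible_field_names
-- ===== SOURCE B (Python) =====
-- def make_global_ranges(field_rules):
--     single_ranges = set()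
--     for ranges in field_rules.values():
--         for r in ranges:
--             single_ranges.add(r)
--     merged_ranges = []
--     while len(single_ranges) > 0:
--         start_a, end_a = single_ranges.pop()
--         to_remove = []
--         for r in single_ranges:
--             start_b, end_b = r
--             if not (start_a > end_b + 1 or start_b > end_a + 1):
--                 start_a = min(start_a, start_b)
--                 end_a = max(end_a, end_b)
--                 to_remove.append(r)
--         for r in to_remove:
--             single_ranges.remove(r)
--         merged_ranges.append((start_a, end_a))
--     return merged_ranges
--
-- def find_valid_tickets(field_rules, tickets):
--     merged_ranges = make_global_ranges(field_rules)
--     valid_tickets = []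
--     for ticket in tickets:
--         if is_valid_ticket(merged_ranges, ticket):
--             valid_tickets.append(ticket)
--     return valid_tickets
--
-- def is_valid_ticket(merged_ranges, ticket):
--     return all(is_valid_value(merged_ranges, value) for value in ticket)
--
-- def is_valid_value(merged_ranges, value):
--     for lo, hi in merged_ranges:
--         if value <= hi and value >= lo:
--             return True
--     return False
--
-- def find_possible_field_names(field_rules, tickets):
--     # column-major: transpose the valid tickets, then build each column's
--     # candidate-name set directly from the rules (no incremental pruning)
--     valid_tickets = find_valid_tickets(field_rules, tickets)
--     num_cols = len(tickets[0])
--     columns = [[t[i] for t in valid_tickets if i < len(t)] for i in range(num_cols)]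
--     return [
--         {name for name, ranges in field_rules.items()
--          if all(any(lo <= v <= hi for lo, hi in ranges) for v in column)}
--         for column in columns
--     ]
-- ===== Notes on version B (the rewrite author's own statement) =====
-- stated objective: alternative
-- what changed: find_possible_field_names is rewritten column-major: instead of starting each column with the full key set and pruning it row by row via remove-lists while scanning every valid ticket, B transposes the valid tickets into per-column value lists and builds each column's candidate set directly with one comprehension over the rules; helpers are kept unchanged.
import Mathlib
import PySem

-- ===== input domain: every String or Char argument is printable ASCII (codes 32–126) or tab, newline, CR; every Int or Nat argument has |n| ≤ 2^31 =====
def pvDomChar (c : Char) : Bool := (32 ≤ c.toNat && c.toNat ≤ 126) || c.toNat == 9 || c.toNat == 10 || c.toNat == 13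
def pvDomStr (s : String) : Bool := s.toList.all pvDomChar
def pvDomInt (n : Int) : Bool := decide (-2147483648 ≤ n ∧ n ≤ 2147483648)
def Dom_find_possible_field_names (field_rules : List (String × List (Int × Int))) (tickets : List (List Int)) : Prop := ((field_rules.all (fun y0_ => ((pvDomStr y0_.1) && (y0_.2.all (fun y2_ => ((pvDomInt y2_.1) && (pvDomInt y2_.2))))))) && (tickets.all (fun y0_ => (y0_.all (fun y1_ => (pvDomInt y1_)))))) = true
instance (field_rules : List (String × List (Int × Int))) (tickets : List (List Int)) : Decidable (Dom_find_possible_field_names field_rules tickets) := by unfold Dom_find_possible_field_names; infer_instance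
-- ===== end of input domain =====

-- B rewrites find_possible_field_names column-major (transpose the valid tickets, then build each
-- column's candidate-name set in one comprehension over the rules) instead of A's row-major pruning
-- of mutable per-column candidate sets; same cost class, a different decomposition ("alternative").

-- ===== PORT A =====
-- field_rules is a Python dict: both ports model it as PySem.Dict.ofList field_rules.

-- helper shared by A's set-removal loops: 'for x in to_remove: s.remove(x)' (the x are always
-- members, so Python's KeyError branch of set.remove never fires; .getD keeps the port total).
def pv_remove_all {α : Type} [BEq α] (s : List α) (tr : List α) : List α :=
  tr.foldl (fun l x => (PySem.Set.remove? l x).getD l) s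

-- the inner 'for r in single_ranges' absorption loop of make_global_ranges
def pv_absorb (rest : List (Int × Int)) (sa ea : Int) : Int × Int × List (Int × Int) :=
  rest.foldl
    (fun st r =>
      if st.1 > r.2 + 1 ∨ r.1 > st.2.1 + 1 then st
      else (min st.1 r.1, max st.2.1 r.2, st.2.2 ++ [r]))
    (sa, ea, ([] : List (Int × Int)))

-- the while-loop of make_global_ranges; Python's set.pop() order is unspecified — we pop the
-- first element; the merged list is only ever consumed through order-insensitive membership.
-- The fuel argument only makes the loop structural: each iteration consumes at least the popped
-- element, so fuel = s.length never runs out.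
def pv_merge_loop : Nat → List (Int × Int) → List (Int × Int)
  | 0, _ => []
  | _, [] => []
  | fuel + 1, r0 :: rest =>
    let st := pv_absorb rest r0.1 r0.2
    (st.1, st.2.1) :: pv_merge_loop fuel (pv_remove_all rest st.2.2)

def pv_make_global_ranges (d : PySem.Dict String (List (Int × Int))) : List (Int × Int) :=
  let single := d.values.foldl (fun s ranges => ranges.foldl PySem.Set.add s) PySem.Set.empty
  pv_merge_loop single.length single

def pv_is_valid_value (merged : List (Int × Int)) (v : Int) : Bool :=
  merged.any (fun r => decide (v ≤ r.2) && decide (r.1 ≤ v))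

def pv_is_valid_ticket (merged : List (Int × Int)) (ticket : List Int) : Bool :=
  ticket.all (fun v => pv_is_valid_value merged v)

def pv_find_valid_tickets (d : PySem.Dict String (List (Int × Int))) (tickets : List (List Int)) :
    List (List Int) :=
  let merged := pv_make_global_ranges d
  tickets.foldl (fun acc t => if pv_is_valid_ticket merged t then acc ++ [t] else acc) []

-- A's removal test: all((value > hi or value < lo) for lo, hi in field_rules[name]);
-- name is always a key of d, so Python's KeyError cannot occur and getD is exact.
def pv_bad (d : PySem.Dict String (List (Int × Int))) (name : String) (v : Int) : Bool :=
  (d.getD name []).all (fun r => decide (v > r.2) || decide (v < r.1))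

-- 'for field_index, value in enumerate(ticket)': build to_remove, then remove each name.
-- possible_field_names[field_index] raises IndexError in Python when field_index is out of
-- range (excluded by Pre_); the total getD/set forms leave cols unchanged there.
def pv_prune_ticket (d : PySem.Dict String (List (Int × Int))) :
    List (List String) → List Int → Nat → List (List String)
  | cols, [], _ => cols
  | cols, v :: vs, i =>
    let s := cols.getD i []
    let to_remove := s.filter (fun name => pv_bad d name v)
    pv_prune_ticket d (cols.set i (pv_remove_all s to_remove)) vs (i + 1)

def find_possible_field_names (field_rules : List (String × List (Int × Int)))
    (tickets : List (List Int)) : List (List String) :=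
  let d := PySem.Dict.ofList field_rules
  let valid := pv_find_valid_tickets d tickets
  match PySem.List.pyGet? tickets 0 with
  | none => []  -- tickets[0] on an empty list raises IndexError in Python (excluded by Pre_)
  | some t0 =>
    -- for i in range(len(tickets[0])): append a copy of set(field_rules.keys())
    let init := (List.range t0.length).map (fun _ => PySem.Set.ofList d.keys)
    valid.foldl (fun cols t => pv_prune_ticket d cols t 0) init

-- ===== PORT B =====
def pvb_keep (ranges : List (Int × Int)) (v : Int) : Bool :=
  ranges.any (fun r => decide (r.1 ≤ v) && decide (v ≤ r.2))

def find_possible_field_names_alt (field_rules : List (String × List (Int × Int)))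
    (tickets : List (List Int)) : List (List String) :=
  let d := PySem.Dict.ofList field_rules
  let valid := pv_find_valid_tickets d tickets
  match PySem.List.pyGet? tickets 0 with
  | none => []  -- len(tickets[0]) raises IndexError in Python here too
  | some t0 =>
    -- columns = [[t[i] for t in valid_tickets if i < len(t)] for i in range(num_cols)]
    let columns := (List.range t0.length).map (fun i => valid.filterMap (fun t => t[i]?))
    -- {name for name, ranges in field_rules.items() if all column values fit}; dict keys are
    -- distinct, so the resulting list already holds the set's distinct elements
    columns.map (fun col =>
      d.items.filterMap (fun p => if col.all (fun v => pvb_keep p.2 v) then some p.1 else none))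

-- ===== PRECONDITION & SPEC =====
-- Pre_ excludes exactly the inputs where Python's A raises IndexError: an empty ticket list
-- (tickets[0]), and ticket lists where some ticket that is valid under the union of the rule
-- intervals is longer than tickets[0] (indexing possible_field_names past its end).
def Pre_find_possible_field_names (field_rules : List (String × List (Int × Int))) (tickets : List (List Int)) : Prop :=
  tickets ≠ [] ∧
  ∀ t ∈ tickets, t.length ≤ tickets.headI.length ∨
    ∃ v ∈ t, ∀ p ∈ (PySem.Dict.ofList field_rules).items, ∀ r ∈ p.2, ¬(r.1 ≤ v ∧ v ≤ r.2)

instance (field_rules : List (String × List (Int × Int))) (tickets : List (List Int)) : Decidable (Pre_find_possible_field_names field_rules tickets) := by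
  unfold Pre_find_possible_field_names; infer_instance

def pvWitness_find_possible_field_names : (List (String × List (Int × Int))) × List (List Int) :=
  ([("a", [(0, 5)])], [[3]])

def Spec_find_possible_field_names (field_rules : List (String × List (Int × Int))) (tickets : List (List Int)) (out : List (List String)) : Prop := out = find_possible_field_names_alt field_rules tickets
instance (field_rules : List (String × List (Int × Int))) (tickets : List (List Int)) (out : List (List String)) : Decidable (Spec_find_possible_field_names field_rules tickets out) := by unfold Spec_find_possible_field_names; infer_instance

-- ===== CLAIM (what is proved, stated in full; the proofs are below) =====
def Claim_equal_find_possible_field_names : Prop := ∀ (field_rules : List (String × List (Int × Int))) (tickets : List (List Int)), Dom_find_possible_field_names field_rules tickets → Pre_find_possible_field_names field_rules tickets → Spec_find_possible_field_names field_rules tickets (find_possible_field_names field_rules tickets)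

-- ===== LEMMAS AND PROOFS =====

-- one removal step is a filter
theorem pv_remove_step {α : Type} [BEq α] [LawfulBEq α] (l : List α) (x : α) :
    (PySem.Set.remove? l x).getD l = l.filter (fun y => !(y == x)) := by
  by_cases h : x ∈ l
  · simp [PySem.Set.remove?, PySem.Set.discard, PySem.Set.contains, h]
  · have hf : l.filter (fun y => !(y == x)) = l :=
      List.filter_eq_self.mpr (fun y hy => by
        simp only [Bool.not_eq_eq_eq_not, Bool.not_true, beq_eq_false_iff_ne]
        rintro rfl; exact h hy)
    simp [PySem.Set.remove?, PySem.Set.contains, h, hf]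

-- removing each element of tr from s (set semantics) filters s by non-membership in tr
theorem pv_remove_all_eq_filter {α : Type} [BEq α] [LawfulBEq α] (tr s : List α) :
    pv_remove_all s tr = s.filter (fun y => !tr.contains y) := by
  induction tr generalizing s with
  | nil => simp [pv_remove_all]
  | cons x tr ih =>
      show pv_remove_all ((PySem.Set.remove? s x).getD s) tr = _
      rw [ih, pv_remove_step, List.filter_filter]
      refine List.filter_congr (fun y _ => ?_)
      simp only [List.contains_cons, Bool.not_or]
      exact Bool.and_comm _ _

-- removing to_remove = s.filter p from s leaves s.filter (!p)
theorem pv_remove_all_filter_self {α : Type} [BEq α] [LawfulBEq α] (s : List α) (p : α → Bool) :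
    pv_remove_all s (s.filter p) = s.filter (fun y => !p y) := by
  rw [pv_remove_all_eq_filter]
  refine List.filter_congr (fun y hy => ?_)
  cases hp : p y <;> simp [List.mem_filter, hp, hy]

theorem pv_prune_getElem? (d : PySem.Dict String (List (Int × Int))) (t : List Int) :
    ∀ (i : Nat) (cols : List (List String)) (j : Nat),
      (pv_prune_ticket d cols t i)[j]? =
        if i ≤ j ∧ j < i + t.length
        then (cols[j]?).map (fun s => s.filter (fun name => !pv_bad d name (t.getD (j - i) 0)))
        else cols[j]? := by
  induction t with
  | nil => intro i cols j; simp [pv_prune_ticket]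
  | cons v vs ih =>
      intro i cols j
      show (pv_prune_ticket d (cols.set i (pv_remove_all _ _)) vs (i + 1))[j]? = _
      rw [pv_remove_all_filter_self, ih, List.getElem?_set]
      by_cases hji : i = j
      · subst hji
        rw [if_neg (show ¬ (i + 1 ≤ i ∧ i < i + 1 + vs.length) by omega)]
        rw [if_pos (show i = i from rfl)]
        rw [if_pos (show i ≤ i ∧ i < i + (v :: vs).length from
          ⟨le_refl i, by simp only [List.length_cons]; omega⟩)]
        by_cases hl : i < cols.length
        · rw [if_pos hl, List.getElem?_eq_getElem hl]
          simp only [Option.map_some]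
          rw [List.getD_eq_getElem cols [] hl]
          simp
        · rw [if_neg hl, List.getElem?_eq_none (by omega)]
          rfl
      · rw [if_neg hji]
        by_cases hc : i ≤ j ∧ j < i + (v :: vs).length
        · have h1 : i + 1 ≤ j ∧ j < i + 1 + vs.length := by
            simp only [List.length_cons] at hc; omega
          have hgd : (v :: vs).getD (j - i) 0 = vs.getD (j - (i + 1)) 0 := by
            rw [show j - i = (j - (i + 1)) + 1 by omega, List.getD_cons_succ]
          rw [if_pos h1, if_pos hc, hgd]
        · have h1 : ¬ (i + 1 ≤ j ∧ j < i + 1 + vs.length) := by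
            simp only [List.length_cons] at hc; omega
          rw [if_neg h1, if_neg hc]

theorem pv_fold_prune (d : PySem.Dict String (List (Int × Int))) :
    ∀ (valid : List (List Int)) (cols : List (List String)) (j : Nat),
      ((valid.foldl (fun c t => pv_prune_ticket d c t 0) cols))[j]? =
        (cols[j]?).map (fun s => s.filter (fun name =>
          (valid.filterMap (fun t => t[j]?)).all (fun v => !pv_bad d name v))) := by
  intro valid
  induction valid with
  | nil => intro cols j; simp
  | cons t rest ih =>
      intro cols j
      rw [List.foldl_cons, ih, pv_prune_getElem?]
      by_cases hj : j < t.length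
      · rw [if_pos (by omega)]
        have ht : t[j]? = some t[j] := List.getElem?_eq_getElem hj
        cases hc : cols[j]? with
        | none => rfl
        | some s =>
            simp only [Option.map_some, List.filterMap_cons, ht, List.filter_filter]
            congr 1
            refine List.filter_congr (fun name _ => ?_)
            have : t.getD (j - 0) 0 = t[j] := by
              simpa using List.getD_eq_getElem t 0 hj
            rw [this]
            simp [List.all_cons, Bool.and_comm]
      · rw [if_neg (by omega)]
        have ht : t[j]? = none := List.getElem?_eq_none (by omega)
        simp [ht]

-- !all(v misses r)  =  any(v in r)
theorem pv_bad_flip (rs : List (Int × Int)) (v : Int) :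
    (!(rs.all (fun r => decide (v > r.2) || decide (v < r.1)))) = pvb_keep rs v := by
  rw [Bool.eq_iff_iff]
  simp only [pvb_keep, Bool.not_eq_eq_eq_not, Bool.not_true, List.all_eq_false,
    List.any_eq_true]
  constructor
  · rintro ⟨r, hr, h⟩; exact ⟨r, hr, by simp at h ⊢; omega⟩
  · rintro ⟨r, hr, h⟩; exact ⟨r, hr, by simp at h ⊢; omega⟩

theorem pv_filterMap_if {α β : Type} (L : List α) (c : α → Bool) (f : α → β) :
    L.filterMap (fun p => if c p then some (f p) else none) = (L.filter c).map f := by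
  induction L with
  | nil => rfl
  | cons a L ih =>
      by_cases h : c a
      · simp [h, ih]
      · simp [h, ih]

theorem pv_column_eq (d : PySem.Dict String (List (Int × Int))) (hnd : d.keys.Nodup)
    (col : List Int) :
    (PySem.Set.ofList d.keys).filter (fun name => col.all (fun v => !pv_bad d name v))
      = d.items.filterMap (fun p => if col.all (fun v => pvb_keep p.2 v) then some p.1 else none) := by
  rw [pv_filterMap_if, show PySem.Set.ofList d.keys = d.keys from by simp [pysem, hnd]]
  show (d.items.map (fun p => p.1)).filter _ = _
  rw [List.filter_map]
  refine congrArg _ (List.filter_congr fun p hp => ?_)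
  have hget : d.getD p.1 [] = p.2 :=
    PySem.Dict.getD_of_mem_items d (by simpa using hp) hnd []
  simp only [Function.comp, pv_bad, hget]
  congr 1
  funext v
  exact pv_bad_flip p.2 v

-- ===== VERDICT (by name: the statement is the Claim_ definition above) =====
theorem find_possible_field_names_spec : Claim_equal_find_possible_field_names := by
  intro field_rules tickets _ hpre
  obtain ⟨hne, -⟩ := hpre
  unfold Spec_find_possible_field_names
  obtain ⟨t0, tl, rfl⟩ := List.exists_cons_of_ne_nil hne
  unfold find_possible_field_names find_possible_field_names_alt
  simp only [PySem.List.pyGet?_zero_cons]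
  set d := PySem.Dict.ofList field_rules with hd
  set valid := pv_find_valid_tickets d (t0 :: tl) with hv
  have hnd : d.keys.Nodup := PySem.Dict.nodup_keys_ofList field_rules
  apply List.ext_getElem?
  intro j
  rw [pv_fold_prune]
  simp only [List.getElem?_map]
  by_cases hj : j < t0.length
  · rw [List.getElem?_range hj]
    simp only [Option.map_some]
    exact congrArg some (pv_column_eq d hnd _)
  · rw [List.getElem?_eq_none (by simp only [List.length_range]; omega)]
    rfl
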